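-- pv_equiv track=rewrite | github.com/Valeria91818/lab11 | lab52.py | generate_arrays_recursive
-- ===== SOURCE A (Python) =====
-- numbers = [0, 1, 2, 3]
--
-- def generate_arrays_recursive(K):
--     """Рекурсивная генерация массивов с уникальными числами 0, 1, 2, 3"""
--     arrays = []
--     def backtrack(current_array):
--         if len(current_array) == K:
--             arrays.append(current_array.copy())
--             return
--         for num in numbers:
--             if num not in current_array:  # Проверка на уникальность
--                 current_array.append(num)
--                 backtrack(current_array)
--                 current_array.pop()
--     backtrack([])
--     return arrays
-- ===== SOURCE B (Python) =====
-- def generate_arrays_recursive(K):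
--     """Iterative breadth-first build of all length-K arrays of distinct numbers 0..3."""
--     if K < 0 or K > 4:
--         return []  # no length-K arrays of distinct elements of {0,1,2,3}
--     frontier = [[]]
--     for _ in range(K):
--         frontier = [p + [n] for p in frontier for n in [0, 1, 2, 3] if n not in p]
--     return frontier
-- ===== Notes on version B (the rewrite author's own statement) =====
-- stated objective: alternative
-- what changed: Replaced the mutating recursive backtracking with an iterative breadth-first frontier: start from [[]] and K times extend every partial array by each unused number, preserving the same lexicographic order.
import Mathlib
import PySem

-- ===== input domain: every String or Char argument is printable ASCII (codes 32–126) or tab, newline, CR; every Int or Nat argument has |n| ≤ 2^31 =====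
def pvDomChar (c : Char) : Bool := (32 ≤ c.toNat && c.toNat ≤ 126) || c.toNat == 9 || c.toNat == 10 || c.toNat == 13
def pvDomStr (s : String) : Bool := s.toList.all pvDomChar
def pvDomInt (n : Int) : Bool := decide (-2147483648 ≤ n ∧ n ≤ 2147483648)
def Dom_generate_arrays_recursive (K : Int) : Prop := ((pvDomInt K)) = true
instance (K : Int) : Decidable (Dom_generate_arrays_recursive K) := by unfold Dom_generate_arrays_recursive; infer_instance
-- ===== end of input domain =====

set_option maxRecDepth 4000


-- B replaces the recursive backtracking with an iterative breadth-first frontier build; same values, same order.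

-- ===== PORT A =====
-- backtrack: fuel is only a totality guard (recursion depth is at most 5 starting from []);
-- otherwise a literal transliteration: arrays is the accumulated output list.
def pvBacktrack (K : Int) : Nat → List Int → List (List Int) → List (List Int)
  | 0, _, arrays => arrays
  | fuel + 1, cur, arrays =>
    if (cur.length : Int) = K then arrays ++ [cur]
    else
      [0, 1, 2, 3].foldl
        (fun acc num => if num ∈ cur then acc else pvBacktrack K fuel (cur ++ [num]) acc)
        arrays

def generate_arrays_recursive (K : Int) : List (List Int) := pvBacktrack K 5 [] []

-- ===== PORT B =====
def pvStep (fr : List (List Int)) : List (List Int) :=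
  fr.flatMap (fun p => ([0, 1, 2, 3].filter (fun n => ¬ n ∈ p)).map (fun n => p ++ [n]))

def generate_arrays_recursive_alt (K : Int) : List (List Int) :=
  if K < 0 ∨ 4 < K then []
  else (PySem.List.pyRange 0 K 1).foldl (fun fr _ => pvStep fr) [[]]

-- ===== PRECONDITION & SPEC =====
def Spec_generate_arrays_recursive (K : Int) (out : List (List Int)) : Prop := out = generate_arrays_recursive_alt K
instance (K : Int) (out : List (List Int)) : Decidable (Spec_generate_arrays_recursive K out) := by unfold Spec_generate_arrays_recursive; infer_instance

-- ===== CLAIM (what is proved, stated in full; the proofs are below) =====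
def Claim_equal_generate_arrays_recursive : Prop := ∀ (K : Int), Dom_generate_arrays_recursive K → Spec_generate_arrays_recursive K (generate_arrays_recursive K)

-- ===== LEMMAS AND PROOFS =====

-- A returns the accumulator unchanged when K is negative
theorem pv_backtrack_neg (K : Int) (hK : K < 0) (fuel : Nat) :
    ∀ cur arrays, pvBacktrack K fuel cur arrays = arrays := by
  induction fuel with
  | zero => intro cur arrays; rfl
  | succ fuel ih =>
    intro cur arrays
    rw [pvBacktrack]
    have h : ¬ ((cur.length : Int) = K) := by omega
    rw [if_neg h]
    simp only [List.foldl]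
    by_cases h0 : (0 : Int) ∈ cur <;> by_cases h1 : (1 : Int) ∈ cur <;>
      by_cases h2 : (2 : Int) ∈ cur <;> by_cases h3 : (3 : Int) ∈ cur <;>
      simp [h0, h1, h2, h3, ih]

-- A returns the accumulator unchanged when K ≥ 5 (depth never reaches K)
theorem pv_backtrack_big (K : Int) (hK : 5 ≤ K) :
    ∀ (fuel : Nat) (cur : List Int) (arrays : List (List Int)),
      fuel + cur.length ≤ 5 → pvBacktrack K fuel cur arrays = arrays := by
  intro fuel
  induction fuel with
  | zero => intro cur arrays _; rfl
  | succ fuel ih =>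
    intro cur arrays hlen
    rw [pvBacktrack]
    have h : ¬ ((cur.length : Int) = K) := by
      have : cur.length ≤ 4 := by omega
      omega
    rw [if_neg h]
    have ih' : ∀ num arrays, pvBacktrack K fuel (cur ++ [num]) arrays = arrays := by
      intro num arrays
      apply ih
      simp; omega
    simp only [List.foldl]
    by_cases h0 : (0 : Int) ∈ cur <;> by_cases h1 : (1 : Int) ∈ cur <;>
      by_cases h2 : (2 : Int) ∈ cur <;> by_cases h3 : (3 : Int) ∈ cur <;>
      simp [h0, h1, h2, h3, ih']

-- ===== VERDICT (by name: the statement is the Claim_ definition above) =====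
theorem generate_arrays_recursive_spec : Claim_equal_generate_arrays_recursive := by
  intro K _
  unfold Spec_generate_arrays_recursive generate_arrays_recursive generate_arrays_recursive_alt
  by_cases hout : K < 0 ∨ 4 < K
  · rw [if_pos hout]
    rcases hout with hneg | hbig
    · rw [pv_backtrack_neg K hneg]
    · rw [pv_backtrack_big K (by omega) 5 [] [] (by simp)]
  · rw [if_neg hout]
    push Not at hout
    obtain ⟨h0, h4⟩ := hout
    interval_cases K <;> decide
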